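-- pv_equiv track=rewrite | github.com/bobr-a/Python-MIREA | pr1.3.py | f13
-- ===== SOURCE A (Python) =====
-- def f13(n, m):
--     s1 = 0
--     s2 = 0
--     for i in range(1, n + 1):
--         for j in range(1, m+1):
--             s1 += (j ** 8 - 84 * j ** 2 - 40)
--     for i in range(1, n + 1):
--         for j in range(1, m+1):
--             s2 += (69 * i + i ** 5)
--     return s1 - 66 * s2
-- ===== SOURCE B (Python) =====
-- def f13(n, m):
--     if n <= 0 or m <= 0:
--         return 0
--     s8 = (10 * m ** 9 + 45 * m ** 8 + 60 * m ** 7 - 42 * m ** 5 + 20 * m ** 3 - 3 * m) // 90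
--     s2 = m * (m + 1) * (2 * m + 1) // 6
--     t1 = n * (n + 1) // 2
--     t5 = (2 * n ** 6 + 6 * n ** 5 + 5 * n ** 4 - n ** 2) // 12
--     return n * (s8 - 84 * s2 - 40 * m) - 66 * m * (69 * t1 + t5)
-- ===== Notes on version B (the rewrite author's own statement) =====
-- stated objective: faster
-- what changed: The separable nested loops are replaced by closed-form Faulhaber power-sum formulas (exact integer division), so the result is computed in O(1) arithmetic instead of O(n*m) iterations.
import Mathlib
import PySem

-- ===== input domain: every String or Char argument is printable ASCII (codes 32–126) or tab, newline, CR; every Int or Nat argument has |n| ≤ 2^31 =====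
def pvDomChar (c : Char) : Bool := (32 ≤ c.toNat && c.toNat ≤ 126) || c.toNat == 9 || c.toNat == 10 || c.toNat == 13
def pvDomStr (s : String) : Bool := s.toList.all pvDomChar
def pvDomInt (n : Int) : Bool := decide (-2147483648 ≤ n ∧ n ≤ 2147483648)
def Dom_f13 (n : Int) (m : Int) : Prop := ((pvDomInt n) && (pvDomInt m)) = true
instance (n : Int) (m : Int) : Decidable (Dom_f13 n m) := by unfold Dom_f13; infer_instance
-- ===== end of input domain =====

-- B replaces A's nested O(n*m) double loops by O(1) closed-form power-sum (Faulhaber) formulas.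

-- ===== PORT A =====
def f13 (n : Int) (m : Int) : Int :=
  let s1 : Int := (PySem.List.pyRange 1 (n+1) 1).foldl (fun s1 _i =>
      (PySem.List.pyRange 1 (m+1) 1).foldl (fun s1 j => s1 + (j ^ 8 - 84 * j ^ 2 - 40)) s1) 0
  let s2 : Int := (PySem.List.pyRange 1 (n+1) 1).foldl (fun s2 i =>
      (PySem.List.pyRange 1 (m+1) 1).foldl (fun s2 _j => s2 + (69 * i + i ^ 5)) s2) 0
  s1 - 66 * s2

-- ===== PORT B =====
def f13_alt (n : Int) (m : Int) : Int :=
  if n ≤ 0 ∨ m ≤ 0 then 0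
  else
    let s8 : Int := PySem.Int.floordiv (10 * m ^ 9 + 45 * m ^ 8 + 60 * m ^ 7 - 42 * m ^ 5 + 20 * m ^ 3 - 3 * m) 90
    let s2 : Int := PySem.Int.floordiv (m * (m + 1) * (2 * m + 1)) 6
    let t1 : Int := PySem.Int.floordiv (n * (n + 1)) 2
    let t5 : Int := PySem.Int.floordiv (2 * n ^ 6 + 6 * n ^ 5 + 5 * n ^ 4 - n ^ 2) 12
    n * (s8 - 84 * s2 - 40 * m) - 66 * m * (69 * t1 + t5)

-- ===== PRECONDITION & SPEC =====
def Spec_f13 (n : Int) (m : Int) (out : Int) : Prop := out = f13_alt n m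
instance (n : Int) (m : Int) (out : Int) : Decidable (Spec_f13 n m out) := by unfold Spec_f13; infer_instance

-- ===== CLAIM (what is proved, stated in full; the proofs are below) =====
def Claim_equal_f13 : Prop := ∀ (n : Int) (m : Int), Dom_f13 n m → Spec_f13 n m (f13 n m)

-- ===== LEMMAS AND PROOFS =====

-- a '+= g j' loop is the initial value plus the sum of the mapped list
theorem foldl_add_map_sum (g : Int → Int) (l : List Int) (s0 : Int) :
    l.foldl (fun s j => s + g j) s0 = s0 + (l.map g).sum := by
  induction l generalizing s0 with
  | nil => simp
  | cons a t ih => simp [List.foldl, ih, add_assoc]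

theorem sum_map_const' (l : List Int) (c : Int) :
    (l.map (fun _ => c)).sum = (l.length : Int) * c := by
  induction l with
  | nil => simp
  | cons a t ih => rw [List.map_cons, List.sum_cons, ih, List.length_cons]; push_cast; ring

-- Faulhaber power sums over range(1, K+1), stated division-free
theorem sum_pow8 (K : Nat) :
    ((PySem.List.pyRange 1 ((K : Int) + 1) 1).map (fun j => j ^ 8)).sum * 90 =
      10 * (K : Int) ^ 9 + 45 * (K : Int) ^ 8 + 60 * (K : Int) ^ 7 - 42 * (K : Int) ^ 5 +
        20 * (K : Int) ^ 3 - 3 * (K : Int) := by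
  induction K with
  | zero => simp
  | succ k ih =>
    push_cast
    rw [PySem.List.pyRange_one_succ_right (by omega)]
    simp only [List.map_append, List.sum_append, List.map_cons, List.map_nil, List.sum_cons,
      List.sum_nil]
    linear_combination ih

theorem sum_pow2 (K : Nat) :
    ((PySem.List.pyRange 1 ((K : Int) + 1) 1).map (fun j => j ^ 2)).sum * 6 =
      (K : Int) * ((K : Int) + 1) * (2 * (K : Int) + 1) := by
  induction K with
  | zero => simp
  | succ k ih =>
    push_cast
    rw [PySem.List.pyRange_one_succ_right (by omega)]
    simp only [List.map_append, List.sum_append, List.map_cons, List.map_nil, List.sum_cons,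
      List.sum_nil]
    linear_combination ih

theorem sum_pow1 (K : Nat) :
    ((PySem.List.pyRange 1 ((K : Int) + 1) 1).map (fun j => j)).sum * 2 =
      (K : Int) * ((K : Int) + 1) := by
  induction K with
  | zero => simp
  | succ k ih =>
    push_cast
    rw [PySem.List.pyRange_one_succ_right (by omega)]
    simp only [List.map_append, List.sum_append, List.map_cons, List.map_nil, List.sum_cons,
      List.sum_nil]
    linear_combination ih

theorem sum_pow5 (K : Nat) :
    ((PySem.List.pyRange 1 ((K : Int) + 1) 1).map (fun j => j ^ 5)).sum * 12 =
      2 * (K : Int) ^ 6 + 6 * (K : Int) ^ 5 + 5 * (K : Int) ^ 4 - (K : Int) ^ 2 := by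
  induction K with
  | zero => simp
  | succ k ih =>
    push_cast
    rw [PySem.List.pyRange_one_succ_right (by omega)]
    simp only [List.map_append, List.sum_append, List.map_cons, List.map_nil, List.sum_cons,
      List.sum_nil]
    linear_combination ih

-- split the two body polynomials into per-power sums
theorem split_body1 (l : List Int) :
    (l.map (fun j => j ^ 8 - 84 * j ^ 2 - 40)).sum =
      (l.map (fun j => j ^ 8)).sum - 84 * (l.map (fun j => j ^ 2)).sum - 40 * (l.length : Int) := by
  induction l with
  | nil => simp
  | cons a t ih =>
    simp only [List.map_cons, List.sum_cons, List.length_cons, ih]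
    push_cast; ring

theorem split_body2 (l : List Int) :
    (l.map (fun i => 69 * i + i ^ 5)).sum =
      69 * (l.map (fun j => j)).sum + (l.map (fun j => j ^ 5)).sum := by
  induction l with
  | nil => simp
  | cons a t ih =>
    simp only [List.map_cons, List.sum_cons, ih]
    ring

theorem exact_floordiv (s d : Int) (hd : 0 < d) : PySem.Int.floordiv (s * d) d = s := by
  rw [PySem.Int.floordiv_eq_ediv_of_pos hd, Int.mul_ediv_cancel _ (by omega)]

-- ===== VERDICT (by name: the statement is the Claim_ definition above) =====
theorem f13_spec : Claim_equal_f13 := by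
  intro n m _
  unfold Spec_f13 f13 f13_alt
  simp only [foldl_add_map_sum, sum_map_const', List.sum_map_mul_left, zero_add]
  by_cases h : n ≤ 0 ∨ m ≤ 0
  · rw [if_pos h]
    rcases h with h | h
    · rw [PySem.List.pyRange_one_eq_nil (by omega : n + 1 ≤ 1)]
      simp
    · rw [PySem.List.pyRange_one_eq_nil (by omega : m + 1 ≤ 1)]
      simp
  · rw [if_neg h]
    push Not at h
    obtain ⟨hn, hm⟩ := h
    obtain ⟨N, rfl⟩ : ∃ N : Nat, n = (N : Int) := ⟨n.toNat, (Int.toNat_of_nonneg (by omega)).symm⟩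
    obtain ⟨M, rfl⟩ : ∃ M : Nat, m = (M : Int) := ⟨m.toNat, (Int.toNat_of_nonneg (by omega)).symm⟩
    rw [split_body1, split_body2]
    have h8 := sum_pow8 M
    have h2 := sum_pow2 M
    have h1 := sum_pow1 N
    have h5 := sum_pow5 N
    rw [show (10 * (M : Int) ^ 9 + 45 * (M : Int) ^ 8 + 60 * (M : Int) ^ 7 - 42 * (M : Int) ^ 5 +
          20 * (M : Int) ^ 3 - 3 * (M : Int)) = _ * 90 from h8.symm, exact_floordiv _ _ (by norm_num)]
    rw [show ((M : Int) * ((M : Int) + 1) * (2 * (M : Int) + 1)) = _ * 6 from h2.symm,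
      exact_floordiv _ _ (by norm_num)]
    rw [show ((N : Int) * ((N : Int) + 1)) = _ * 2 from h1.symm, exact_floordiv _ _ (by norm_num)]
    rw [show (2 * (N : Int) ^ 6 + 6 * (N : Int) ^ 5 + 5 * (N : Int) ^ 4 - (N : Int) ^ 2) = _ * 12
        from h5.symm, exact_floordiv _ _ (by norm_num)]
    rw [PySem.List.length_pyRange_one, PySem.List.length_pyRange_one]
    have hM : (((M : Int) + 1 - 1).toNat : Int) = (M : Int) := by omega
    have hN : (((N : Int) + 1 - 1).toNat : Int) = (N : Int) := by omega
    rw [hM, hN]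
    ring
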